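-- pv_equiv track=rewrite | github.com/joqjoq966/Algorithm_python | Codeforces/Round#708/a.py | solve
-- ===== SOURCE A (Python) =====
-- def solve(n,arr):
--     count = [0]*101
--     ans = []
--     arr.sort()
--     for i in arr:
--         count[i] += 1
--     for i in range(101):
--         if count[i] >= 1:
--             ans.append(i)
--             count[i] -= 1
--
--     for i in range(101):
--         if count[i] > 0:
--             while count[i]:
--                 ans.append(i)
--                 count[i] -= 1
--
--     return ans
-- ===== SOURCE B (Python) =====
-- def solve(n, arr):
--     arr.sort()
--     first = []
--     rest = []
--     prev = None
--     for v in arr: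
--         if v != prev:
--             first.append(v)
--             prev = v
--         else:
--             rest.append(v)
--     return first + rest
-- ===== Notes on version B (the rewrite author's own statement) =====
-- stated objective: simpler
-- what changed: Replaces the fixed 101-slot count array and its three scans over range(101) by a single pass over the sorted array that compares each element with the previous one, sending first occurrences to one list and duplicates to another.
-- outside the precondition, e.g. on solve(1, [-1]): A returns [100], B returns [-1]; on solve(2, [-101, 0]): A returns [0, 0], B returns [-101, 0]
import Mathlib
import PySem

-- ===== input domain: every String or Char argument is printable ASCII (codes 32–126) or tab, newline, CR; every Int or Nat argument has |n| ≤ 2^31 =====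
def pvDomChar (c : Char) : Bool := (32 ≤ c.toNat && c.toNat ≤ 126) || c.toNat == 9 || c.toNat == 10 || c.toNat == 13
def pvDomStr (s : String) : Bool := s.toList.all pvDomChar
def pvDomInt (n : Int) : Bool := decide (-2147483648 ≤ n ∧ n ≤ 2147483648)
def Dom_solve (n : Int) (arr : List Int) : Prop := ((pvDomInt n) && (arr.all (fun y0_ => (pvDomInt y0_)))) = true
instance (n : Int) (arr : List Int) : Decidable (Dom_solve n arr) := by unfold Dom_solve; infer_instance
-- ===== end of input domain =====

-- B replaces A's 101-slot count array and three range(101) scans by one pass over the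
-- sorted array comparing each element with the previous one (objective: simpler).
-- Both A and B sort `arr` in place; the equivalence proved here is about the return value.

-- ===== PORT A =====
-- 'while count[i]: ans.append(i); count[i] -= 1', run with fuel = count[i].toNat
def solveWhile (i : Int) : Nat → List Int × List Int → List Int × List Int
  | 0, st => st
  | fuel+1, st =>
    if PySem.List.pyGetD st.1 i 0 ≠ 0 then
      solveWhile i fuel (PySem.List.pySetD st.1 i (PySem.List.pyGetD st.1 i 0 - 1), st.2 ++ [i])
    else st

def solve (n : Int) (arr : List Int) : List Int :=
  let count : List Int := List.replicate 101 0
  let ans : List Int := []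
  let s := PySem.List.sorted arr (fun x => x) false
  let count := s.foldl (fun c i => PySem.List.pySetD c i (PySem.List.pyGetD c i 0 + 1)) count
  let st := (PySem.List.pyRange 0 101 1).foldl (fun (st : List Int × List Int) i =>
      if 1 ≤ PySem.List.pyGetD st.1 i 0 then
        (PySem.List.pySetD st.1 i (PySem.List.pyGetD st.1 i 0 - 1), st.2 ++ [i])
      else st) (count, ans)
  let st := (PySem.List.pyRange 0 101 1).foldl (fun (st : List Int × List Int) i =>
      if 0 < PySem.List.pyGetD st.1 i 0 then
        solveWhile i (PySem.List.pyGetD st.1 i 0).toNat st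
      else st) st
  st.2

-- ===== PORT B =====
def solve_alt (n : Int) (arr : List Int) : List Int :=
  let s := PySem.List.sorted arr (fun x => x) false
  let st := s.foldl (fun (st : List Int × List Int × Option Int) v =>
      if st.2.2 ≠ some v then (st.1 ++ [v], st.2.1, some v)
      else (st.1, st.2.1 ++ [v], st.2.2)) ([], [], none)
  st.1 ++ st.2.1

-- ===== PRECONDITION & SPEC =====
-- Pre_ restricts to the task's natural value domain 0..100 (the 101-slot count array):
-- above 100 or below -101 A raises IndexError; on negative elements in [-101,-1] A still
-- returns, but via Python negative-index wraparound (count[i] aliases count[101+i]), an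
-- accidental value B does not reproduce (see cites in claim.json).
def Pre_solve (n : Int) (arr : List Int) : Prop := ∀ x ∈ arr, 0 ≤ x ∧ x ≤ 100
instance (n : Int) (arr : List Int) : Decidable (Pre_solve n arr) := by unfold Pre_solve; infer_instance
def pvWitness_solve : Int × List Int := (3, [1, 2, 1])

def Spec_solve (n : Int) (arr : List Int) (out : List Int) : Prop := out = solve_alt n arr
instance (n : Int) (arr : List Int) (out : List Int) : Decidable (Spec_solve n arr out) := by unfold Spec_solve; infer_instance

-- ===== CLAIM (what is proved, stated in full; the proofs are below) =====
def Claim_equal_solve : Prop := ∀ (n : Int) (arr : List Int), Dom_solve n arr → Pre_solve n arr → Spec_solve n arr (solve n arr)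

-- ===== LEMMAS AND PROOFS =====

theorem pv_getD_setD (c : List Int) (i j v : Int) (hi0 : 0 ≤ i) (hi : i < (c.length : Int)) (hj0 : 0 ≤ j) :
    PySem.List.pyGetD (PySem.List.pySetD c i v) j 0 = if j = i then v else PySem.List.pyGetD c j 0 := by
  have h1 : i = ((i.toNat : Nat) : Int) := by omega
  have h2 : j = ((j.toNat : Nat) : Int) := by omega
  rw [h1, h2, PySem.List.pyGetD_pySetD_natCast _ _ _ _ _ (by omega)]
  by_cases h : j.toNat = i.toNat
  · simp [h]
  · rw [if_neg h, if_neg (by omega)]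

theorem pv_getD_replicate (m : Nat) (j : Int) (hj0 : 0 ≤ j) :
    PySem.List.pyGetD (List.replicate m (0:Int)) j 0 = 0 := by
  rw [PySem.List.pyGetD_of_nonneg _ _ hj0]
  simp only [List.getD, List.getElem?_replicate]
  split <;> rfl

-- count accumulation loop (first for-loop of A)
theorem pv_countLoop (s : List Int) : ∀ (c : List Int), c.length = 101 → (∀ x ∈ s, 0 ≤ x ∧ x ≤ 100) →
    (s.foldl (fun c i => PySem.List.pySetD c i (PySem.List.pyGetD c i 0 + 1)) c).length = 101 ∧
    ∀ j : Int, 0 ≤ j →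
      PySem.List.pyGetD (s.foldl (fun c i => PySem.List.pySetD c i (PySem.List.pyGetD c i 0 + 1)) c) j 0
        = PySem.List.pyGetD c j 0 + (s.count j : Int) := by
  induction s with
  | nil => intro c hc _; exact ⟨hc, by simp⟩
  | cons x t ih =>
    intro c hc hb
    have hx := hb x (by simp)
    have hlen : (PySem.List.pySetD c x (PySem.List.pyGetD c x 0 + 1)).length = 101 := by
      rw [PySem.List.length_pySetD]; exact hc
    obtain ⟨ihl, ihv⟩ := ih _ hlen (fun y hy => hb y (by simp [hy]))
    refine ⟨ihl, ?_⟩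
    intro j hj0
    rw [List.foldl_cons] at *
    rw [ihv j hj0, pv_getD_setD c x j _ hx.1 (by omega) hj0]
    by_cases h : j = x
    · simp [h]; ring
    · simp [h, Ne.symm h]

-- second for-loop of A: emit one copy of each present value, decrement its count
theorem pv_loop2 (rs : List Int) : ∀ (c ans : List Int), rs.Nodup → (∀ j ∈ rs, 0 ≤ j ∧ j < 101) →
    c.length = 101 →
    (rs.foldl (fun (st : List Int × List Int) i =>
        if 1 ≤ PySem.List.pyGetD st.1 i 0 then
          (PySem.List.pySetD st.1 i (PySem.List.pyGetD st.1 i 0 - 1), st.2 ++ [i])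
        else st) (c, ans)).1.length = 101 ∧
    (rs.foldl (fun (st : List Int × List Int) i =>
        if 1 ≤ PySem.List.pyGetD st.1 i 0 then
          (PySem.List.pySetD st.1 i (PySem.List.pyGetD st.1 i 0 - 1), st.2 ++ [i])
        else st) (c, ans)).2 = ans ++ rs.filter (fun j => 1 ≤ PySem.List.pyGetD c j 0) ∧
    ∀ j : Int, 0 ≤ j →
      PySem.List.pyGetD (rs.foldl (fun (st : List Int × List Int) i =>
        if 1 ≤ PySem.List.pyGetD st.1 i 0 then
          (PySem.List.pySetD st.1 i (PySem.List.pyGetD st.1 i 0 - 1), st.2 ++ [i])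
        else st) (c, ans)).1 j 0 =
      if j ∈ rs ∧ 1 ≤ PySem.List.pyGetD c j 0 then PySem.List.pyGetD c j 0 - 1
      else PySem.List.pyGetD c j 0 := by
  induction rs with
  | nil => intro c ans _ _ hc; refine ⟨hc, by simp, by intro j _; simp⟩
  | cons i t ih =>
    intro c ans hnd hb hc
    have hi := hb i (by simp)
    have hit : i ∉ t := (List.nodup_cons.mp hnd).1
    rw [List.foldl_cons]
    by_cases hcase : 1 ≤ PySem.List.pyGetD c i 0
    · rw [if_pos hcase]
      have hlen : (PySem.List.pySetD c i (PySem.List.pyGetD c i 0 - 1)).length = 101 := by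
        rw [PySem.List.length_pySetD]; exact hc
      obtain ⟨ihl, ihans, ihv⟩ := ih (PySem.List.pySetD c i (PySem.List.pyGetD c i 0 - 1)) (ans ++ [i])
        (List.nodup_cons.mp hnd).2 (fun y hy => hb y (by simp [hy])) hlen
      have hget : ∀ j : Int, 0 ≤ j →
          PySem.List.pyGetD (PySem.List.pySetD c i (PySem.List.pyGetD c i 0 - 1)) j 0
            = if j = i then PySem.List.pyGetD c i 0 - 1 else PySem.List.pyGetD c j 0 := by
        intro j hj; exact pv_getD_setD c i j _ hi.1 (by omega) hj
      refine ⟨ihl, ?_, ?_⟩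
      · rw [ihans]
        rw [List.filter_cons, if_pos (by simpa using hcase)]
        have : t.filter (fun j => 1 ≤ PySem.List.pyGetD (PySem.List.pySetD c i (PySem.List.pyGetD c i 0 - 1)) j 0)
            = t.filter (fun j => 1 ≤ PySem.List.pyGetD c j 0) := by
          apply List.filter_congr
          intro y hy
          rw [hget y (hb y (by simp [hy])).1, if_neg (by rintro rfl; exact hit hy)]
        rw [this]; simp
      · intro j hj
        rw [ihv j hj, hget j hj]
        by_cases hji : j = i
        · subst hji
          simp [hit, hcase]
        · simp only [if_neg hji]
          by_cases hjt : j ∈ t <;> simp [hjt, hji]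
    · rw [if_neg hcase]
      obtain ⟨ihl, ihans, ihv⟩ := ih c ans (List.nodup_cons.mp hnd).2 (fun y hy => hb y (by simp [hy])) hc
      refine ⟨ihl, ?_, ?_⟩
      · rw [ihans, List.filter_cons, if_neg (by simpa using hcase)]
      · intro j hj
        rw [ihv j hj]
        by_cases hji : j = i
        · subst hji; simp [hcase]
        · simp [hji]

-- the inner while-loop empties slot i, appending i count-many times
theorem pv_while (i : Int) (hi0 : 0 ≤ i) (hi1 : i < 101) :
    ∀ (k : Nat) (c ans : List Int), c.length = 101 → PySem.List.pyGetD c i 0 = (k : Int) →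
    (solveWhile i k (c, ans)).1.length = 101 ∧
    (solveWhile i k (c, ans)).2 = ans ++ List.replicate k i ∧
    ∀ j : Int, 0 ≤ j → PySem.List.pyGetD (solveWhile i k (c, ans)).1 j 0 =
      if j = i then 0 else PySem.List.pyGetD c j 0 := by
  intro k
  induction k with
  | zero =>
    intro c ans hc hv
    refine ⟨hc, by simp [solveWhile], ?_⟩
    intro j hj
    by_cases hji : j = i <;> simp [solveWhile, hji, hv]
  | succ m ih =>
    intro c ans hc hv
    have hne : PySem.List.pyGetD c i 0 ≠ 0 := by rw [hv]; omega
    have hstep : solveWhile i (m+1) (c, ans)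
        = solveWhile i m (PySem.List.pySetD c i (PySem.List.pyGetD c i 0 - 1), ans ++ [i]) := by
      simp [solveWhile, hne]
    have hget : ∀ j : Int, 0 ≤ j →
        PySem.List.pyGetD (PySem.List.pySetD c i (PySem.List.pyGetD c i 0 - 1)) j 0
          = if j = i then PySem.List.pyGetD c i 0 - 1 else PySem.List.pyGetD c j 0 :=
      fun j hj => pv_getD_setD c i j _ hi0 (by omega) hj
    have hlen : (PySem.List.pySetD c i (PySem.List.pyGetD c i 0 - 1)).length = 101 := by
      rw [PySem.List.length_pySetD]; exact hc
    have hv' : PySem.List.pyGetD (PySem.List.pySetD c i (PySem.List.pyGetD c i 0 - 1)) i 0 = (m : Int) := by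
      rw [hget i hi0, if_pos rfl, hv]; push_cast; ring
    obtain ⟨ihl, ihans, ihv⟩ := ih _ (ans ++ [i]) hlen hv'
    rw [hstep]
    refine ⟨ihl, ?_, ?_⟩
    · rw [ihans]; simp [List.replicate_succ]
    · intro j hj
      rw [ihv j hj]
      by_cases hji : j = i
      · simp [hji]
      · simp only [if_neg hji]; rw [hget j hj, if_neg hji]

-- third for-loop of A: flush the remaining counts in ascending order
theorem pv_loop3 (rs : List Int) : ∀ (c ans : List Int), rs.Nodup → (∀ j ∈ rs, 0 ≤ j ∧ j < 101) →
    c.length = 101 → (∀ j ∈ rs, 0 ≤ PySem.List.pyGetD c j 0) →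
    (rs.foldl (fun (st : List Int × List Int) i =>
        if 0 < PySem.List.pyGetD st.1 i 0 then
          solveWhile i (PySem.List.pyGetD st.1 i 0).toNat st
        else st) (c, ans)).2
      = ans ++ rs.flatMap (fun j => List.replicate (PySem.List.pyGetD c j 0).toNat j) := by
  induction rs with
  | nil => intro c ans _ _ _ _; simp
  | cons i t ih =>
    intro c ans hnd hb hc hnn
    have hi := hb i (by simp)
    have hit : i ∉ t := (List.nodup_cons.mp hnd).1
    rw [List.foldl_cons, List.flatMap_cons]
    by_cases hcase : 0 < PySem.List.pyGetD c i 0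
    · rw [if_pos hcase]
      have hv : PySem.List.pyGetD c i 0 = ((PySem.List.pyGetD c i 0).toNat : Int) := by omega
      obtain ⟨wl, wans, wv⟩ := pv_while i hi.1 hi.2 (PySem.List.pyGetD c i 0).toNat c ans hc hv
      have heq : (solveWhile i (PySem.List.pyGetD c i 0).toNat (c, ans))
          = ((solveWhile i (PySem.List.pyGetD c i 0).toNat (c, ans)).1,
             ans ++ List.replicate (PySem.List.pyGetD c i 0).toNat i) := by
        rw [← wans]
      rw [heq]
      rw [ih _ _ (List.nodup_cons.mp hnd).2 (fun y hy => hb y (by simp [hy])) wl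
        (fun y hy => by
          rw [wv y (hb y (by simp [hy])).1, if_neg (by rintro rfl; exact hit hy)]
          exact hnn y (by simp [hy]))]
      have : t.flatMap (fun j => List.replicate
            (PySem.List.pyGetD (solveWhile i (PySem.List.pyGetD c i 0).toNat (c, ans)).1 j 0).toNat j)
          = t.flatMap (fun j => List.replicate (PySem.List.pyGetD c j 0).toNat j) := by
        apply List.flatMap_congr
        intro y hy
        rw [wv y (hb y (by simp [hy])).1, if_neg (by rintro rfl; exact hit hy)]
      rw [this, List.append_assoc]
    · rw [if_neg hcase]
      have h0 : (PySem.List.pyGetD c i 0).toNat = 0 := by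
        have := hnn i (by simp); omega
      rw [ih c ans (List.nodup_cons.mp hnd).2 (fun y hy => hb y (by simp [hy])) hc
        (fun y hy => hnn y (by simp [hy])), h0]
      simp

-- B's fold over a constant block once the value became the previous one: all go to `rest`
theorem pv_blockRest (j : Int) : ∀ (k : Nat) (first rest : List Int),
    (List.replicate k j).foldl (fun (st : List Int × List Int × Option Int) v =>
        if st.2.2 ≠ some v then (st.1 ++ [v], st.2.1, some v)
        else (st.1, st.2.1 ++ [v], st.2.2)) (first, rest, some j)
      = (first, rest ++ List.replicate k j, some j) := by
  intro k
  induction k with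
  | zero => intro first rest; simp
  | succ m ih =>
    intro first rest
    rw [List.replicate_succ, List.foldl_cons]
    simp only [ne_eq, not_true_eq_false, reduceIte]
    rw [ih]
    simp

-- B's fold over one constant block: head to `first`, the rest to `rest`
theorem pv_block (j : Int) (p : Option Int) (hp : p ≠ some j) (k : Nat) (first rest : List Int) :
    (List.replicate (k+1) j).foldl (fun (st : List Int × List Int × Option Int) v =>
        if st.2.2 ≠ some v then (st.1 ++ [v], st.2.1, some v)
        else (st.1, st.2.1 ++ [v], st.2.2)) (first, rest, p)
      = (first ++ [j], rest ++ List.replicate k j, some j) := by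
  rw [List.replicate_succ, List.foldl_cons, if_pos (by simpa using hp)]
  exact pv_blockRest j k (first ++ [j]) rest

-- B's fold over the block decomposition of the sorted list
theorem pv_Bmain (k : Int → Nat) : ∀ (rs : List Int), rs.Pairwise (· < ·) →
    ∀ (first rest : List Int) (p : Option Int), (∀ j ∈ rs, p ≠ some j) →
    ∃ p', (rs.flatMap (fun j => List.replicate (k j) j)).foldl
        (fun (st : List Int × List Int × Option Int) v =>
          if st.2.2 ≠ some v then (st.1 ++ [v], st.2.1, some v)
          else (st.1, st.2.1 ++ [v], st.2.2)) (first, rest, p)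
      = (first ++ rs.filter (fun j => decide (1 ≤ k j)),
         rest ++ rs.flatMap (fun j => List.replicate (k j - 1) j), p') := by
  intro rs
  induction rs with
  | nil => intro _ first rest p _; exact ⟨p, by simp⟩
  | cons j t ih =>
    intro hpw first rest p hp
    rw [List.flatMap_cons, List.foldl_append, List.filter_cons, List.flatMap_cons]
    rcases Nat.eq_zero_or_pos (k j) with h0 | hpos
    · rw [h0]
      simp only [List.replicate_zero, List.foldl_nil]
      obtain ⟨p', hp'⟩ := ih (List.pairwise_cons.mp hpw).2 first rest p (fun y hy => hp y (by simp [hy]))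
      refine ⟨p', ?_⟩
      rw [hp']
      rw [if_neg (by simp)]
      simp
    · obtain ⟨m, hm⟩ : ∃ m, k j = m + 1 := ⟨k j - 1, by omega⟩
      rw [hm, pv_block j p (hp j (by simp)) m first rest]
      obtain ⟨p', hp'⟩ := ih (List.pairwise_cons.mp hpw).2 (first ++ [j]) (rest ++ List.replicate m j) (some j)
        (fun y hy => by
          have := (List.pairwise_cons.mp hpw).1 y hy
          simp only [ne_eq, Option.some.injEq]
          omega)
      refine ⟨p', ?_⟩
      rw [hp']
      rw [if_pos (by simp)]
      simp

theorem pv_blocks_count (k : Int → Nat) (v : Int) : ∀ (rs : List Int), rs.Nodup →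
    (rs.flatMap (fun j => List.replicate (k j) j)).count v = if v ∈ rs then k v else 0 := by
  intro rs
  induction rs with
  | nil => simp
  | cons j t ih =>
    intro hnd
    rw [List.flatMap_cons, List.count_append, ih (List.nodup_cons.mp hnd).2, List.count_replicate]
    by_cases hv : v = j
    · subst hv
      simp [(List.nodup_cons.mp hnd).1]
    · simp [hv, Ne.symm hv]

theorem pv_blocks_sorted (k : Int → Nat) : ∀ (rs : List Int), rs.Pairwise (· < ·) →
    (rs.flatMap (fun j => List.replicate (k j) j)).Pairwise (· ≤ ·) := by
  intro rs
  induction rs with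
  | nil => simp
  | cons j t ih =>
    intro hpw
    rw [List.flatMap_cons, List.pairwise_append]
    refine ⟨List.pairwise_replicate.mpr (Or.inr le_rfl), ih (List.pairwise_cons.mp hpw).2, ?_⟩
    intro a ha b hb
    obtain ⟨j', hj't, hb'⟩ := List.mem_flatMap.mp hb
    have hj' := (List.pairwise_cons.mp hpw).1 j' hj't
    have : a = j := (List.eq_of_mem_replicate ha)
    have : b = j' := (List.eq_of_mem_replicate hb')
    omega

theorem pv_s_eq_blocks (arr : List Int) (h : ∀ x ∈ arr, 0 ≤ x ∧ x ≤ 100) :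
    PySem.List.sorted arr (fun x => x) false
      = (PySem.List.pyRange 0 101 1).flatMap (fun j => List.replicate (arr.count j) j) := by
  apply PySem.List.eq_of_perm_of_pairwise_le_of_injective (fun x : Int => x) (fun a b hab => hab)
  · refine ((PySem.List.sorted_perm arr _ _).trans ?_)
    rw [List.perm_iff_count]
    intro v
    rw [pv_blocks_count _ v _ (PySem.List.nodup_pyRange_one 0 101)]
    by_cases hv : v ∈ PySem.List.pyRange 0 101 1
    · simp [hv]
    · rw [if_neg hv]
      rw [PySem.List.mem_pyRange_one] at hv
      rw [List.count_eq_zero]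
      intro hmem
      have := h v hmem
      omega
  · exact PySem.List.sorted_pairwise arr _
  · exact pv_blocks_sorted _ _ (PySem.List.pairwise_lt_pyRange_one 0 101)

set_option maxRecDepth 4096 in
theorem main_eq (n : Int) (arr : List Int)
    (h : ∀ x ∈ arr, 0 ≤ x ∧ x ≤ 100) : solve n arr = solve_alt n arr := by
  have hs : ∀ x ∈ PySem.List.sorted arr (fun x : Int => x) false, 0 ≤ x ∧ x ≤ 100 := by
    intro x hx
    exact h x ((PySem.List.sorted_perm arr _ _).subset hx)
  have hcount : ∀ j : Int, (PySem.List.sorted arr (fun x : Int => x) false).count j = arr.count j :=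
    fun j => (PySem.List.sorted_perm arr _ _).count_eq j
  have hrsb : ∀ j ∈ PySem.List.pyRange 0 101 1, 0 ≤ j ∧ j < 101 := by
    intro j hj; rw [PySem.List.mem_pyRange_one] at hj; omega
  have hnd := PySem.List.nodup_pyRange_one 0 101
  -- A side
  obtain ⟨hl1, hv1⟩ := pv_countLoop (PySem.List.sorted arr (fun x : Int => x) false)
    (List.replicate 101 0) (by simp) hs
  set c1 : List Int := (PySem.List.sorted arr (fun x : Int => x) false).foldl
    (fun c i => PySem.List.pySetD c i (PySem.List.pyGetD c i 0 + 1)) (List.replicate 101 (0:Int)) with hc1def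
  clear_value c1
  have hv1' : ∀ j : Int, 0 ≤ j → PySem.List.pyGetD c1 j 0 = (arr.count j : Int) := by
    intro j hj
    rw [hv1 j hj, pv_getD_replicate _ _ hj, hcount j]
    ring
  obtain ⟨hl2, hans2, hv2⟩ := pv_loop2 (PySem.List.pyRange 0 101 1) c1 [] hnd hrsb hl1
  set st2 := (PySem.List.pyRange 0 101 1).foldl (fun (st : List Int × List Int) i =>
      if 1 ≤ PySem.List.pyGetD st.1 i 0 then
        (PySem.List.pySetD st.1 i (PySem.List.pyGetD st.1 i 0 - 1), st.2 ++ [i])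
      else st) (c1, []) with hst2def
  clear_value st2
  have hnn : ∀ j ∈ PySem.List.pyRange 0 101 1, 0 ≤ PySem.List.pyGetD st2.1 j 0 := by
    intro j hj
    rw [hv2 j (hrsb j hj).1, hv1' j (hrsb j hj).1]
    split <;> omega
  have hA : solve n arr = st2.2 ++ (PySem.List.pyRange 0 101 1).flatMap
      (fun j => List.replicate (PySem.List.pyGetD st2.1 j 0).toNat j) := by
    have hA0 : solve n arr = ((PySem.List.pyRange 0 101 1).foldl (fun (st : List Int × List Int) i =>
        if 0 < PySem.List.pyGetD st.1 i 0 then solveWhile i (PySem.List.pyGetD st.1 i 0).toNat st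
        else st) st2).2 := by
      rw [hst2def, hc1def]
      rfl
    rw [hA0, ← Prod.mk.eta (p := st2)]
    exact pv_loop3 (PySem.List.pyRange 0 101 1) st2.1 st2.2 hnd hrsb hl2 hnn
  rw [hA, hans2]
  have hfilter : (PySem.List.pyRange 0 101 1).filter (fun j => 1 ≤ PySem.List.pyGetD c1 j 0)
      = (PySem.List.pyRange 0 101 1).filter (fun j => decide (1 ≤ arr.count j)) := by
    apply List.filter_congr
    intro j hj
    rw [hv1' j (hrsb j hj).1]
    simp
  have hflat : (PySem.List.pyRange 0 101 1).flatMap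
      (fun j => List.replicate (PySem.List.pyGetD st2.1 j 0).toNat j)
      = (PySem.List.pyRange 0 101 1).flatMap (fun j => List.replicate (arr.count j - 1) j) := by
    apply List.flatMap_congr
    intro j hj
    rw [hv2 j (hrsb j hj).1, hv1' j (hrsb j hj).1]
    by_cases hge : 1 ≤ arr.count j
    · rw [if_pos ⟨hj, by exact_mod_cast hge⟩,
        show ((arr.count j : Int) - 1).toNat = arr.count j - 1 by omega]
    · rw [if_neg (by intro hc; exact absurd (by exact_mod_cast hc.2) (by omega)),
        show ((arr.count j : Int)).toNat = arr.count j - 1 by omega]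
  rw [hfilter, hflat]
  -- B side
  obtain ⟨p', hB⟩ := pv_Bmain (fun j => arr.count j) (PySem.List.pyRange 0 101 1)
    (PySem.List.pairwise_lt_pyRange_one 0 101) [] [] none (by simp)
  show _ = (((PySem.List.sorted arr (fun x : Int => x) false).foldl _ ([], [], none)).1 ++ _)
  rw [pv_s_eq_blocks arr h, hB]
  simp

-- ===== VERDICT (by name: the statement is the Claim_ definition above) =====
theorem solve_spec : Claim_equal_solve := by
  intro n arr _ hpre
  exact main_eq n arr hpre
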